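-- pv_equiv track=rewrite | github.com/ZagkasD/Microprocessors-Homeworks | 2/2_3_SW_MC.py | calculate_switches
-- ===== SOURCE A (Python) =====
-- def calculate_switches(switchesNumber, vectorsNumber, workload, Output):
--     for i in range(vectorsNumber):
--         # Checking the output of the OR gate for each input from the workload
--         newGateOutput = ((workload[i][0] and workload[i][1]) and (not (workload[i][2])))
--
--         if (Output == newGateOutput): # No switching
--             continue
--         else:   # Switching
--             Output = newGateOutput
--             switchesNumber += 1
--     return switchesNumber
-- ===== SOURCE B (Python) =====
-- def calculate_switches(switchesNumber, vectorsNumber, workload, Output):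
--     # Run-jumping: instead of comparing every gate output with a rolling state,
--     # repeatedly SEARCH for the next occurrence of the complemented value with
--     # list.index, hopping over whole runs of equal outputs; each hop is one switch.
--     gates = [(w[0] and w[1]) and not w[2] for w in workload[:max(vectorsNumber, 0)]]
--     count, cur = 0, Output
--     while True:
--         try:
--             j = gates.index(not cur)
--         except ValueError:
--             break
--         gates = gates[j + 1:]
--         cur = not cur
--         count += 1
--     return switchesNumber + count
-- ===== Notes on version B (the rewrite author's own statement) =====
-- stated objective: alternative
-- what changed: Replaces the element-by-element rolling-state loop by a run-jumping search: build the gate list, then repeatedly locate the next occurrence of the complemented value with list.index and hop past whole runs of equal outputs, counting one switch per hop.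
import Mathlib
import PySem

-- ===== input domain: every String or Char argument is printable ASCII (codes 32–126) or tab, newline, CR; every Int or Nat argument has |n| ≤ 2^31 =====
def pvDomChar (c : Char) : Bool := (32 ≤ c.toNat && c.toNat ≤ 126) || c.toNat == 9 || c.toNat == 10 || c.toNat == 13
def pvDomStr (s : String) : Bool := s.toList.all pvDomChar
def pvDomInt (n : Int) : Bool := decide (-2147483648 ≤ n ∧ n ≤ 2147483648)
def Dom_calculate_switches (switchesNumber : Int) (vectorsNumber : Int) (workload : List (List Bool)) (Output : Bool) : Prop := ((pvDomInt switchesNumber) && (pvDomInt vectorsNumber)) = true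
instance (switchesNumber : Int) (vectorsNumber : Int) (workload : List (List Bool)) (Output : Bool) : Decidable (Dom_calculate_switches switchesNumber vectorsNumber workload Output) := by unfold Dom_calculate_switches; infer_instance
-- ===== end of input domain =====

-- B replaces A's element-by-element rolling-state loop by a run-jumping search over the
-- gate-output list (find the next complemented value, hop past the run, count one switch);
-- alternative decomposition, same cost; return-value equivalence only.

-- ===== PORT A =====
-- rolling state (switchesNumber, Output) over the indices range(vectorsNumber)
def calculate_switches (switchesNumber : Int) (vectorsNumber : Int) (workload : List (List Bool)) (Output : Bool) : Int :=
  ((PySem.List.pyRange 0 vectorsNumber 1).foldl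
    (fun (st : Int × Bool) i =>
      let row := PySem.List.pyGetD workload i ([] : List Bool)
      let newGateOutput := (PySem.List.pyGetD row 0 false && PySem.List.pyGetD row 1 false)
                            && !(PySem.List.pyGetD row 2 false)
      if st.2 == newGateOutput then st else (st.1 + 1, newGateOutput))
    (switchesNumber, Output)).1

-- ===== PORT B =====
-- the while-loop of Source B: j = gates.index(not cur); gates = gates[j+1:]; cur = not cur; count += 1
def pvJump (cur : Bool) (gates : List Bool) : Int :=
  match h : PySem.List.index? gates (!cur) with
  | none => 0
  | some j => 1 + pvJump (!cur) (gates.drop (j + 1))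
termination_by gates.length
decreasing_by
  obtain ⟨hk, -, -⟩ := PySem.List.getElem_of_index?_eq_some h
  simp [List.length_drop]; omega

-- gates = [(w[0] and w[1]) and not w[2] for w in workload[:max(vectorsNumber, 0)]]
def calculate_switches_alt (switchesNumber : Int) (vectorsNumber : Int) (workload : List (List Bool)) (Output : Bool) : Int :=
  let gates := (PySem.List.slice workload none (some (max vectorsNumber 0))).map
    (fun w => (PySem.List.pyGetD w 0 false && PySem.List.pyGetD w 1 false)
               && !(PySem.List.pyGetD w 2 false))
  switchesNumber + pvJump Output gates

-- ===== PRECONDITION & SPEC =====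
-- Pre_ excludes exactly the inputs on which Python A raises IndexError: an iteration index
-- beyond the workload, or a visited row too short for the (short-circuiting) gate expression.
def Pre_calculate_switches (switchesNumber : Int) (vectorsNumber : Int) (workload : List (List Bool)) (Output : Bool) : Prop :=
  vectorsNumber ≤ (workload.length : Int) ∧
    ∀ row ∈ workload.take vectorsNumber.toNat,
      3 ≤ row.length ∨ (1 ≤ row.length ∧ row.getD 0 false = false)
        ∨ (2 ≤ row.length ∧ row.getD 1 false = false)
instance (switchesNumber : Int) (vectorsNumber : Int) (workload : List (List Bool)) (Output : Bool) : Decidable (Pre_calculate_switches switchesNumber vectorsNumber workload Output) := by unfold Pre_calculate_switches; infer_instance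
def pvWitness_calculate_switches : Int × Int × List (List Bool) × Bool := (0, 1, [[true, true, false]], false)

def Spec_calculate_switches (switchesNumber : Int) (vectorsNumber : Int) (workload : List (List Bool)) (Output : Bool) (out : Int) : Prop := out = calculate_switches_alt switchesNumber vectorsNumber workload Output
instance (switchesNumber : Int) (vectorsNumber : Int) (workload : List (List Bool)) (Output : Bool) (out : Int) : Decidable (Spec_calculate_switches switchesNumber vectorsNumber workload Output out) := by unfold Spec_calculate_switches; infer_instance

-- ===== CLAIM (what is proved, stated in full; the proofs are below) =====
def Claim_equal_calculate_switches : Prop := ∀ (switchesNumber : Int) (vectorsNumber : Int) (workload : List (List Bool)) (Output : Bool), Dom_calculate_switches switchesNumber vectorsNumber workload Output → Pre_calculate_switches switchesNumber vectorsNumber workload Output → Spec_calculate_switches switchesNumber vectorsNumber workload Output (calculate_switches switchesNumber vectorsNumber workload Output)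

-- ===== LEMMAS AND PROOFS =====

-- the gate expression shared by both programs
def pvGate (row : List Bool) : Bool :=
  (PySem.List.pyGetD row 0 false && PySem.List.pyGetD row 1 false)
    && !(PySem.List.pyGetD row 2 false)

-- A's index loop equals a fold over the first n rows
theorem pvA_take (n : Nat) (w : List (List Bool)) (st : Int × Bool) (hn : n ≤ w.length) :
    (PySem.List.pyRange 0 (n : Int) 1).foldl
      (fun (st : Int × Bool) i =>
        let g := pvGate (PySem.List.pyGetD w i ([] : List Bool))
        if st.2 == g then st else (st.1 + 1, g)) st
    = (w.take n).foldl
        (fun (st : Int × Bool) row =>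
          let g := pvGate row
          if st.2 == g then st else (st.1 + 1, g)) st := by
  induction n generalizing st with
  | zero => simp [PySem.List.pyRange_one_eq_nil]
  | succ m ih =>
    have hm : m < w.length := hn
    have hr : PySem.List.pyRange 0 ((m + 1 : Nat) : Int) 1
        = PySem.List.pyRange 0 (m : Int) 1 ++ [(m : Int)] := by
      push_cast
      exact PySem.List.pyRange_one_succ_right (by positivity)
    have ht : w.take (m + 1) = w.take m ++ [w[m]] := by
      rw [List.take_succ, List.getElem?_eq_getElem hm]; rfl
    rw [hr, List.foldl_append, ih st (le_of_lt hm), ht, List.foldl_append]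
    simp [PySem.List.pyGetD_natCast, List.getD, List.getElem?_eq_getElem hm]

-- the fold over rows is a fold over the mapped gate list
theorem pvFold_map (rows : List (List Bool)) (st : Int × Bool) :
    rows.foldl
      (fun (st : Int × Bool) row =>
        let g := pvGate row
        if st.2 == g then st else (st.1 + 1, g)) st
    = (rows.map pvGate).foldl
        (fun (st : Int × Bool) g =>
          if st.2 == g then st else (st.1 + 1, g)) st := by
  rw [List.foldl_map]

-- unfolding equations of pvJump
theorem pvJump_of_none (cur : Bool) (gs : List Bool)
    (h : PySem.List.index? gs (!cur) = none) : pvJump cur gs = 0 := by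
  rw [pvJump]; split
  · rfl
  · rename_i j heq
    rw [h] at heq; cases heq

theorem pvJump_of_some (cur : Bool) (gs : List Bool) (j : Nat)
    (h : PySem.List.index? gs (!cur) = some j) :
    pvJump cur gs = 1 + pvJump (!cur) (gs.drop (j + 1)) := by
  rw [pvJump]; split
  · rename_i heq
    rw [h] at heq; cases heq
  · rename_i j' heq
    rw [h] at heq
    cases heq; rfl

-- pvJump skips a head equal to the current value
theorem pvJump_cons_eq (cur : Bool) (gs : List Bool) :
    pvJump cur (cur :: gs) = pvJump cur gs := by
  have hne := PySem.List.index?_cons_of_ne (x := cur) (v := !cur) gs (by simp)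
  cases h : PySem.List.index? gs (!cur) with
  | none =>
      rw [pvJump_of_none cur gs h,
          pvJump_of_none cur (cur :: gs) (by rw [hne, h]; rfl)]
  | some j =>
      rw [pvJump_of_some cur gs j h,
          pvJump_of_some cur (cur :: gs) (j + 1) (by rw [hne, h]; rfl)]
      simp

-- a head equal to the complement is one hop
theorem pvJump_cons_ne (cur : Bool) (gs : List Bool) :
    pvJump cur ((!cur) :: gs) = 1 + pvJump (!cur) gs := by
  rw [pvJump_of_some cur ((!cur) :: gs) 0 (PySem.List.index?_cons_self _ _)]
  simp

-- the rolling fold over the gate list counts exactly pvJump's hops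
theorem pvFold_jump (gs : List Bool) (s : Int) (O : Bool) :
    ((gs.foldl (fun (st : Int × Bool) g =>
        if st.2 == g then st else (st.1 + 1, g)) (s, O)).1)
    = s + pvJump O gs := by
  induction gs generalizing s O with
  | nil =>
    rw [pvJump_of_none O [] (by rw [PySem.List.index?_eq_idxOf?]; rfl)]
    simp
  | cons g gs ih =>
    by_cases h : O = g
    · subst h
      simp only [List.foldl_cons, BEq.rfl, if_pos]
      rw [ih, pvJump_cons_eq]
    · have hg : g = !O := by cases O <;> cases g <;> simp_all
      subst hg
      simp only [List.foldl_cons]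
      rw [if_neg (by simp), ih, pvJump_cons_ne]
      ring

theorem calculate_switches_spec : Claim_equal_calculate_switches := by
  intro s v w O _ hpre
  unfold Spec_calculate_switches calculate_switches calculate_switches_alt
  rcases hpre with ⟨hv, _⟩
  by_cases hv0 : v ≤ 0
  · rw [PySem.List.pyRange_one_eq_nil hv0]
    have hmax : max v 0 = ((0 : Nat) : Int) := by omega
    rw [hmax, PySem.List.slice_to_natCast]
    simp [pvJump_of_none O [] (by rw [PySem.List.index?_eq_idxOf?]; rfl)]
  · push_neg at hv0
    obtain ⟨n, rfl⟩ : ∃ n : Nat, v = (n : Int) :=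
      ⟨v.toNat, (Int.toNat_of_nonneg (le_of_lt hv0)).symm⟩
    have hmax : max ((n : Nat) : Int) 0 = ((n : Nat) : Int) := by omega
    have hlen : n ≤ w.length := by omega
    rw [hmax, PySem.List.slice_to_natCast]
    have hA := pvA_take n w (s, O) hlen
    simp only [pvGate] at hA
    rw [hA]
    have hf := pvFold_map (w.take n) (s, O)
    simp only [pvGate] at hf
    rw [hf]
    exact pvFold_jump _ s O
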